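-- pv_equiv track=rewrite | github.com/triplejay2013/ProjectEuler | 46/goldbach.py | composites
-- ===== SOURCE A (Python) =====
-- def _try_composite(a, d, n, s):
--     if pow(a, d, n) == 1:
--         return False
--     for i in range(s):
--         if pow(a, 2**i * d, n) == n-1:
--             return False
--     return True # n  is definitely composite
--
-- def is_prime(n, _precision_for_huge_n=16):
--     if n in _known_primes or n in (0, 1):
--         return True
--     if any((n % p) == 0 for p in _known_primes):
--         return False
--     d, s = n - 1, 0
--     while not d % 2:
--         d, s = d >> 1, s + 1
--     # Returns exact according to http://primes.utm.edu/prove/prove2_3.html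
--     if n < 1373653:
--         return not any(_try_composite(a, d, n, s) for a in (2, 3))
--     if n < 25326001:
--         return not any(_try_composite(a, d, n, s) for a in (2, 3, 5))
--     if n < 118670087467:
--         if n == 3215031751:
--             return False
--         return not any(_try_composite(a, d, n, s) for a in (2, 3, 5, 7))
--     if n < 2152302898747:
--         return not any(_try_composite(a, d, n, s) for a in (2, 3, 5, 7, 11))
--     if n < 3474749660383:
--         return not any(_try_composite(a, d, n, s) for a in (2, 3, 5, 7, 11, 13))
--     if n < 341550071728321:
--         return not any(_try_composite(a, d, n, s) for a in (2, 3, 5, 7, 11, 13, 17))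
--     # otherwise
--     return not any(_try_composite(a, d, n, s)
--                    for a in _known_primes[:_precision_for_huge_n])
--
-- _known_primes = [2, 3]
--
-- def twiceSquare(n):
--     return 2*(n**2)
--
-- def composites(n):
--     ret=(n,)
--     # In both for loops, n is the largest possible value (finding sum, sum of n+n is always > n
--     for i in range(2,n):
--         if is_prime(i):
--             for j in range(1,n):
--                 _try=i+twiceSquare(j)
--                 if _try>n: break
--                 if _try==n:
--                     return ret+(i,"2x{}^2".format(j))
--     x=(-1,"None")
--     return ret+x
-- ===== SOURCE B (Python) =====
-- def _try_composite(a, d, n, s):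
--     if pow(a, d, n) == 1:
--         return False
--     for i in range(s):
--         if pow(a, 2**i * d, n) == n-1:
--             return False
--     return True # n  is definitely composite
--
-- def is_prime(n, _precision_for_huge_n=16):
--     if n in _known_primes or n in (0, 1):
--         return True
--     if any((n % p) == 0 for p in _known_primes):
--         return False
--     d, s = n - 1, 0
--     while not d % 2:
--         d, s = d >> 1, s + 1
--     if n < 1373653:
--         return not any(_try_composite(a, d, n, s) for a in (2, 3))
--     if n < 25326001:
--         return not any(_try_composite(a, d, n, s) for a in (2, 3, 5))
--     if n < 118670087467:
--         if n == 3215031751: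
--             return False
--         return not any(_try_composite(a, d, n, s) for a in (2, 3, 5, 7))
--     if n < 2152302898747:
--         return not any(_try_composite(a, d, n, s) for a in (2, 3, 5, 7, 11))
--     if n < 3474749660383:
--         return not any(_try_composite(a, d, n, s) for a in (2, 3, 5, 7, 11, 13))
--     if n < 341550071728321:
--         return not any(_try_composite(a, d, n, s) for a in (2, 3, 5, 7, 11, 13, 17))
--     return not any(_try_composite(a, d, n, s)
--                    for a in _known_primes[:_precision_for_huge_n])
--
-- _known_primes = [2, 3]
--
-- def composites(n):
--     # Scan square indices j downward instead of scanning every i for primality: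
--     # the largest j with 2*j*j <= n-2 gives the smallest candidate i = n - 2*j*j.
--     j = 0
--     while 2 * (j + 1) * (j + 1) <= n - 2:
--         j += 1
--     while j >= 1:
--         i = n - 2 * j * j
--         if is_prime(i):
--             return (n, i, "2x{}^2".format(j))
--         j -= 1
--     return (n, -1, "None")
-- ===== Notes on version B (the rewrite author's own statement) =====
-- stated objective: faster
-- what changed: Instead of primality-testing every integer below n with a nested inner scan over twice-squares, B computes the largest square index j whose doubled square still leaves a candidate of at least two and walks j downward, primality-testing only the O(sqrt(n)) candidates i = n - 2*j*j; the first hit (largest j = smallest prime i) reproduces A's result exactly.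
import Mathlib
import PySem

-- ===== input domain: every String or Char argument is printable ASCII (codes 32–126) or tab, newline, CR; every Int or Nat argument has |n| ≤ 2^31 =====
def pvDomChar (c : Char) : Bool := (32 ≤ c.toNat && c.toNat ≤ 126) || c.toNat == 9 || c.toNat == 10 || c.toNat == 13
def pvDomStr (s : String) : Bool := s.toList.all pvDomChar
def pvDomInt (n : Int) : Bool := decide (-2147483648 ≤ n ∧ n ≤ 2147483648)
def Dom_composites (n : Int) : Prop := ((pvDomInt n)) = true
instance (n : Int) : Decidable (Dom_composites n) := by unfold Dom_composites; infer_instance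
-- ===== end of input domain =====

-- B scans square indices j downward (i = n - 2*j*j ascending) instead of testing every i < n
-- for primality with a nested square search; same return value, far fewer primality tests.

-- ===== PORT A =====

-- pow(a, d, n) in _try_composite is PySem.Int.powMod (exponents here are ≥ 0)
def tryComposite (a d n s : Int) : Bool :=
  if PySem.Int.powMod a d.toNat n = 1 then false
  else if (PySem.List.pyRange 0 s).any
      (fun i => PySem.Int.powMod a ((2 : Int) ^ i.toNat * d).toNat n = n - 1) then false
  else true

-- `while not d % 2: d, s = d >> 1, s + 1`; the d = 0 guard only makes the recursion total
-- (Python loops forever there; composites never reaches it: d = n - 1 with n ≥ 5 odd)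
def oddify (d s : Int) : Int × Int :=
  if _h0 : d = 0 then (d, s)
  else if _h2 : PySem.Int.mod d 2 = 0 then oddify (PySem.Int.floordiv d 2) (s + 1) else (d, s)
termination_by d.natAbs
decreasing_by
  have hdvd : (2 : Int) ∣ d := (PySem.Int.mod_eq_zero_iff_dvd d 2).1 _h2
  rw [PySem.Int.floordiv_eq_ediv_of_pos (by omega : (0:Int) < 2)]
  omega

def anyComposite (bases : List Int) (d n s : Int) : Bool :=
  bases.any (fun a => tryComposite a d n s)

def isPrime (n : Int) : Bool :=
  if n = 2 ∨ n = 3 ∨ n = 0 ∨ n = 1 then true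
  else if PySem.Int.mod n 2 = 0 ∨ PySem.Int.mod n 3 = 0 then false
  else
    let ds := oddify (n - 1) 0
    if n < 1373653 then !(anyComposite [2, 3] ds.1 n ds.2)
    else if n < 25326001 then !(anyComposite [2, 3, 5] ds.1 n ds.2)
    else if n < 118670087467 then
      if n = 3215031751 then false else !(anyComposite [2, 3, 5, 7] ds.1 n ds.2)
    else if n < 2152302898747 then !(anyComposite [2, 3, 5, 7, 11] ds.1 n ds.2)
    else if n < 3474749660383 then !(anyComposite [2, 3, 5, 7, 11, 13] ds.1 n ds.2)
    else if n < 341550071728321 then !(anyComposite [2, 3, 5, 7, 11, 13, 17] ds.1 n ds.2)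
    else !(anyComposite [2, 3] ds.1 n ds.2)  -- _known_primes[:16] = [2, 3]

def twiceSquare (n : Int) : Int := 2 * n ^ 2

-- inner `for j in range(1, n)` with break on _try > n
def innerLoop (n i : Int) : List Int → Option Int
  | [] => none
  | j :: rest =>
    let t := i + twiceSquare j
    if t > n then none
    else if t = n then some j
    else innerLoop n i rest

-- outer `for i in range(2, n)`
def outerLoop (n : Int) : List Int → Int × Int × String
  | [] => (n, -1, "None")
  | i :: rest =>
    if isPrime i then
      match innerLoop n i (PySem.List.pyRange 1 n) with
      | some j => (n, i, "2x" ++ PySem.Int.toStr j ++ "^2")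
      | none => outerLoop n rest
    else outerLoop n rest

def composites (n : Int) : Int × Int × String :=
  outerLoop n (PySem.List.pyRange 2 n)

-- ===== PORT B =====

-- `while 2*(j+1)*(j+1) <= n-2: j += 1`
def findJmax (n : Int) (j : Nat) : Nat :=
  if 2 * ((j : Int) + 1) * ((j : Int) + 1) ≤ n - 2 then findJmax n (j + 1) else j
termination_by (n - j).toNat
decreasing_by
  have h1 : (j : Int) + 1 ≤ n - 2 := by nlinarith
  omega

-- `while j >= 1: i = n - 2*j*j; …; j -= 1`
def bloop (n : Int) : Nat → Int × Int × String
  | 0 => (n, -1, "None")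
  | k + 1 =>
    let i := n - 2 * ((k : Int) + 1) * ((k : Int) + 1)
    if isPrime i then (n, i, "2x" ++ PySem.Int.toStr ((k : Int) + 1) ++ "^2")
    else bloop n k

def composites_alt (n : Int) : Int × Int × String :=
  bloop n (findJmax n 0)

-- ===== PRECONDITION & SPEC =====
def Spec_composites (n : Int) (out : Int × Int × String) : Prop := out = composites_alt n
instance (n : Int) (out : Int × Int × String) : Decidable (Spec_composites n out) := by unfold Spec_composites; infer_instance

-- ===== CLAIM (what is proved, stated in full; the proofs are below) =====
def Claim_equal_composites : Prop := ∀ (n : Int), Dom_composites n → Spec_composites n (composites n)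

-- ===== LEMMAS AND PROOFS =====

-- If i + 2*J^2 = n with J ≥ 1 and i ≥ 2, the inner scan starting anywhere at or below J finds J.
lemma innerLoop_some (n i J : Int) (hi : 2 ≤ i) (hJ : 1 ≤ J) (hEq : i + 2 * J ^ 2 = n) :
    ∀ (m : Nat) (k : Int), (J - k).toNat = m → 1 ≤ k → k ≤ J →
      innerLoop n i (PySem.List.pyRange k n) = some J := by
  intro m
  induction m using Nat.strong_induction_on with
  | _ m ih =>
    intro k hm hk1 hkJ
    have hJn : J < n := by nlinarith
    rw [PySem.List.pyRange_one_cons (by omega)]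
    rcases eq_or_lt_of_le hkJ with heq | hlt
    · subst heq
      simp [innerLoop, twiceSquare, hEq]
    · have ht : i + twiceSquare k < n := by
        simp only [twiceSquare]; nlinarith
      simp only [innerLoop]
      rw [if_neg (by omega), if_neg (by omega)]
      exact ih (J - (k + 1)).toNat (by omega) (k + 1) rfl (by omega) (by omega)

-- If n - i is not twice a positive square, the inner scan returns none.
lemma innerLoop_none (n i : Int) (hno : ∀ J : Int, 1 ≤ J → i + 2 * J ^ 2 ≠ n) :
    ∀ (m : Nat) (k : Int), (n - k).toNat = m → 1 ≤ k →
      innerLoop n i (PySem.List.pyRange k n) = none := by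
  intro m
  induction m using Nat.strong_induction_on with
  | _ m ih
  =>
    intro k hm hk1
    by_cases hkn : k < n
    · rw [PySem.List.pyRange_one_cons hkn]
      simp only [innerLoop]
      have hne : i + twiceSquare k ≠ n := by
        simpa [twiceSquare] using hno k hk1
      by_cases hbr : i + twiceSquare k > n
      · rw [if_pos hbr]
      · rw [if_neg hbr, if_neg hne]
        exact ih (n - (k + 1)).toNat (by omega) (k + 1) rfl (by omega)
    · rw [PySem.List.pyRange_one_eq_nil (by omega)]
      rfl

-- Main correspondence: A's ascending scan from lo equals B's descending scan from j,
-- given that j indexes exactly the squares whose candidate i = n - 2*j'^2 is still ≥ lo.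
lemma loop_eq (n : Int) :
    ∀ (m : Nat) (lo : Int) (j : Nat), (n - lo).toNat = m → 2 ≤ lo →
      (∀ j' : Nat, 1 ≤ j' → (lo ≤ n - 2 * (j' : Int) ^ 2 ↔ j' ≤ j)) →
      outerLoop n (PySem.List.pyRange lo n) = bloop n j := by
  intro m
  induction m using Nat.strong_induction_on with
  | _ m ih =>
    intro lo j hm hlo hinv
    by_cases hln : lo < n
    · rw [PySem.List.pyRange_one_cons hln]
      by_cases hex : ∃ j' : Nat, 1 ≤ j' ∧ n - 2 * (j' : Int) ^ 2 = lo
      · obtain ⟨j', hj'1, hj'e⟩ := hex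
        have hj'le : j' ≤ j := (hinv j' hj'1).1 (by omega)
        have hjj : j' = j := by
          by_contra hne
          have hjlt : j' < j := lt_of_le_of_ne hj'le hne
          have hj1 : (1 : Nat) ≤ j := by omega
          have h2 : lo ≤ n - 2 * (j : Int) ^ 2 := (hinv j hj1).2 (le_refl j)
          have : 2 * (j' : Int) ^ 2 < 2 * (j : Int) ^ 2 := by
            have : (j' : Int) < (j : Int) := by exact_mod_cast hjlt
            have h0 : (1 : Int) ≤ (j' : Int) := by exact_mod_cast hj'1
            nlinarith
          omega
        subst hjj
        obtain ⟨k, rfl⟩ : ∃ k, j' = k + 1 := ⟨j' - 1, by omega⟩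
        have hcast : ((k + 1 : Nat) : Int) = (k : Int) + 1 := by push_cast; ring
        have hieq : n - 2 * ((k : Int) + 1) * ((k : Int) + 1) = lo := by
          rw [hcast] at hj'e; nlinarith [hj'e]
        by_cases hp : isPrime lo
        · have hA : innerLoop n lo (PySem.List.pyRange 1 n) = some ((k : Int) + 1) := by
            apply innerLoop_some n lo ((k : Int) + 1) hlo (by omega)
              (by nlinarith [hieq]) (((k : Int) + 1) - 1).toNat 1 rfl le_rfl (by omega)
          simp only [outerLoop, bloop]
          rw [if_pos hp, hA, hieq, if_pos hp]
        · simp only [outerLoop, bloop]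
          rw [if_neg hp, hieq, if_neg hp]
          apply ih (n - (lo + 1)).toNat (by omega) (lo + 1) k rfl (by omega)
          intro j'' hj''1
          constructor
          · intro hle
            have : j'' ≤ k + 1 := (hinv j'' hj''1).1 (by omega)
            rcases eq_or_lt_of_le this with he | hl
            · exfalso
              have : ((j'' : Nat) : Int) = (k : Int) + 1 := by rw [he]; push_cast; ring
              rw [this] at hle
              nlinarith [hieq]
            · omega
          · intro hle
            have hlt : ((j'' : Nat) : Int) < (k : Int) + 1 := by exact_mod_cast Nat.lt_succ_of_le hle
            have h1 : (1 : Int) ≤ (j'' : Int) := by exact_mod_cast hj''1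
            nlinarith [hieq]
      · -- lo is not of the form n - 2*j'^2: A skips it (prime or not), B's state is unchanged
        have hstep : outerLoop n (lo :: PySem.List.pyRange (lo + 1) n) =
            outerLoop n (PySem.List.pyRange (lo + 1) n) := by
          by_cases hp : isPrime lo
          · have hA : innerLoop n lo (PySem.List.pyRange 1 n) = none := by
              apply innerLoop_none n lo _ (n - 1).toNat 1 rfl le_rfl
              intro J hJ hEq
              refine hex ⟨J.toNat, by omega, ?_⟩
              have hc : ((J.toNat : Nat) : Int) = J := Int.toNat_of_nonneg (by omega)
              rw [hc]; omega
            simp only [outerLoop]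
            rw [if_pos hp, hA]
          · simp only [outerLoop]
            rw [if_neg hp]
        rw [hstep]
        apply ih (n - (lo + 1)).toNat (by omega) (lo + 1) j rfl (by omega)
        intro j'' hj''1
        constructor
        · intro hle
          exact (hinv j'' hj''1).1 (by omega)
        · intro hle
          have h1 : lo ≤ n - 2 * (j'' : Int) ^ 2 := (hinv j'' hj''1).2 hle
          have h2 : n - 2 * (j'' : Int) ^ 2 ≠ lo := fun he => hex ⟨j'', hj''1, he⟩
          omega
    · rw [PySem.List.pyRange_one_eq_nil (by omega)]
      have hj0 : j = 0 := by
        by_contra hne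
        have hj1 : (1 : Nat) ≤ j := by omega
        have h2 : lo ≤ n - 2 * (j : Int) ^ 2 := (hinv j hj1).2 (le_refl j)
        have h1 : (1 : Int) ≤ (j : Int) := by exact_mod_cast hj1
        nlinarith
      subst hj0
      rfl

lemma findJmax_spec (n : Int) :
    ∀ (m : Nat) (j : Nat), (n - j).toNat = m →
      (j = 0 ∨ 2 * (j : Int) * (j : Int) ≤ n - 2) →
      (findJmax n j = 0 ∨ 2 * ((findJmax n j : Nat) : Int) * ((findJmax n j : Nat) : Int) ≤ n - 2) ∧
      ¬(2 * (((findJmax n j : Nat) : Int) + 1) * (((findJmax n j : Nat) : Int) + 1) ≤ n - 2) ∧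
      j ≤ findJmax n j := by
  intro m
  induction m using Nat.strong_induction_on with
  | _ m ih =>
    intro j hm hj
    rw [findJmax]
    by_cases hc : 2 * ((j : Int) + 1) * ((j : Int) + 1) ≤ n - 2
    · rw [if_pos hc]
      have h1 : (j : Int) + 1 ≤ n - 2 := by nlinarith
      have hrec := ih (n - (j + 1 : Nat)).toNat (by push_cast; omega) (j + 1) rfl
        (Or.inr (by push_cast; linarith))
      exact ⟨hrec.1, hrec.2.1, by omega⟩
    · rw [if_neg hc]
      exact ⟨hj, hc, le_refl j⟩

-- ===== VERDICT (by name: the statement is the Claim_ definition above) =====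
theorem composites_spec : Claim_equal_composites := by
  intro n _
  unfold Spec_composites composites composites_alt
  have hF := findJmax_spec n (n - (0 : Nat)).toNat 0 rfl (Or.inl rfl)
  set J := findJmax n 0 with hJdef
  apply loop_eq n (n - 2).toNat 2 J rfl le_rfl
  intro j' hj'1
  have h1 : (1 : Int) ≤ (j' : Int) := by exact_mod_cast hj'1
  constructor
  · intro hle
    by_contra hgt
    have hJlt : (J : Int) + 1 ≤ (j' : Int) := by exact_mod_cast (by omega : J + 1 ≤ j')
    have : 2 * ((J : Int) + 1) * ((J : Int) + 1) ≤ 2 * (j' : Int) * (j' : Int) := by nlinarith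
    have : 2 * ((J : Int) + 1) * ((J : Int) + 1) ≤ n - 2 := by nlinarith
    exact hF.2.1 this
  · intro hle
    have hJ1 : (1 : Nat) ≤ J := by omega
    rcases hF.1 with h0 | hb
    · omega
    · have hle' : (j' : Int) ≤ (J : Int) := by exact_mod_cast hle
      nlinarith
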